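-- pv_equiv track=rewrite | github.com/cli135/Replit-files | python-code/DRW2024Prob2.py | solution
-- ===== SOURCE A (Python) =====
-- def solution(A):
--     # Implement your solution here
--     max_sum = 0
--     sorted_rows = []
--     for row in A:
--         # make sure that when you sort you
--         # sort in the correct direction
--         sorted_rows.append(sorted(row, reverse=True))
--     for i in range(len(A)):
--         for j in range(len(A[0])):
--             pass
--             # start at i, j
--             candidates = []
--             for k in range(len(A)):
--                 if k == i:
--                     continue
--                 if sorted_rows[k][0] != A[k][j]:
--                     candidates.append(sorted_rows[k][0])
--                 else:
--                     candidates.append(sorted_rows[k][1])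
--             # candidates.sort(reverse=True)
--             max_in_candidates = max(candidates)
--             max_sum = max(max_sum, A[i][j] + max_in_candidates)
--     return max_sum
-- ===== SOURCE B (Python) =====
-- def solution(A):
--     # Per column, compute each row's candidate (row max, or second max when the
--     # row max equals that row's entry in the column) once, take the top of those
--     # candidates plus the runner-up with the top's position, and answer every
--     # row's leave-one-out query in O(1): O(n*m) instead of A's O(n^2 * m).
--     if not A or not A[0]:
--         return 0
--     n, m = len(A), len(A[0])
--     tops = []
--     for row in A:
--         s = sorted(row, reverse=True)
--         tops.append((s[0], s[1]))
--     col = []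
--     for j in range(m):
--         cand = []
--         for k in range(n):
--             t1, t2 = tops[k]
--             cand.append(t1 if t1 != A[k][j] else t2)
--         b1 = max(cand)
--         i1 = cand.index(b1)
--         b2 = max(cand[:i1] + cand[i1 + 1:])
--         col.append((b1, i1, b2))
--     best = 0
--     for i in range(n):
--         for j in range(m):
--             b1, i1, b2 = col[j]
--             best = max(best, A[i][j] + (b2 if i == i1 else b1))
--     return best
-- ===== Notes on version B (the rewrite author's own statement) =====
-- stated objective: faster
-- what changed: Instead of rescanning all other rows for every cell, B precomputes per column the candidate value of every row and that column's top candidate with its position and the runner-up, answering each cell's max-over-other-rows in O(1).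
import Mathlib
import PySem

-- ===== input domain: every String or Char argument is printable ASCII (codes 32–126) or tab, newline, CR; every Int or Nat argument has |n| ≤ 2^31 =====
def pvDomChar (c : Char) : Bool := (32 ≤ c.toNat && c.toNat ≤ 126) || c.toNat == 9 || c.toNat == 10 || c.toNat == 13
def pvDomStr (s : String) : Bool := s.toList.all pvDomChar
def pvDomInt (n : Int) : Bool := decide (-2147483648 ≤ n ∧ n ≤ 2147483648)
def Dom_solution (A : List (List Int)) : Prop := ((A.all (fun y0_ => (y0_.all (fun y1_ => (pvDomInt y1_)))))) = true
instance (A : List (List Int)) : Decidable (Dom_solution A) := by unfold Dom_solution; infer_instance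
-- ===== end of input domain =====

-- B replaces A's per-cell rescan of all other rows by per-column precomputed
-- candidates with their top value, its position and the runner-up (objective: faster).

-- ===== PORT A =====
-- out-of-range indexing and max([]) raise in Python; they are excluded by Pre_solution,
-- so the `getD 0` / `getD []` defaults are never reached on admitted inputs.
def solution (A : List (List Int)) : Int :=
  let sorted_rows := A.foldl
    (fun acc row => acc ++ [PySem.List.sorted row (fun x => x) true]) ([] : List (List Int))
  (List.range A.length).foldl (fun max_sum (i : Nat) =>
    (List.range (PySem.List.pyGetD A 0 []).length).foldl (fun max_sum (j : Nat) =>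
      let candidates := (List.range A.length).foldl (fun acc (k : Nat) =>
        if k = i then acc
        else
          if PySem.List.pyGetD (PySem.List.pyGetD sorted_rows (k : Int) []) 0 0 ≠
              PySem.List.pyGetD (PySem.List.pyGetD A (k : Int) []) (j : Int) 0 then
            acc ++ [PySem.List.pyGetD (PySem.List.pyGetD sorted_rows (k : Int) []) 0 0]
          else
            acc ++ [PySem.List.pyGetD (PySem.List.pyGetD sorted_rows (k : Int) []) 1 0])
        ([] : List Int)
      let max_in_candidates := (PySem.List.max? candidates (fun x => x)).getD 0
      max max_sum (PySem.List.pyGetD (PySem.List.pyGetD A (i : Int) []) (j : Int) 0 +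
        max_in_candidates)) max_sum) 0

-- ===== PORT B =====
def solution_alt (A : List (List Int)) : Int :=
  if A = [] ∨ A.headD [] = [] then 0
  else
    let n := A.length
    let m := (A.headD []).length
    let tops := A.foldl (fun acc row =>
      acc ++ [(PySem.List.pyGetD (PySem.List.sorted row (fun x => x) true) 0 0,
               PySem.List.pyGetD (PySem.List.sorted row (fun x => x) true) 1 0)])
      ([] : List (Int × Int))
    let col := (List.range m).foldl (fun acc (j : Nat) =>
      let cand := (List.range n).foldl (fun acc (k : Nat) =>
        let t := PySem.List.pyGetD tops (k : Int) (0, 0)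
        acc ++ [if t.1 ≠ PySem.List.pyGetD (PySem.List.pyGetD A (k : Int) []) (j : Int) 0
                then t.1 else t.2]) ([] : List Int)
      let b1 := (PySem.List.max? cand (fun x => x)).getD 0
      let i1 := (PySem.List.index? cand b1).getD 0
      let b2 := (PySem.List.max? (PySem.List.slice cand none (some (i1 : Int)) ++
                  PySem.List.slice cand (some ((i1 : Int) + 1)) none) (fun x => x)).getD 0
      acc ++ [(b1, i1, b2)]) ([] : List (Int × Nat × Int))
    (List.range n).foldl (fun best (i : Nat) =>
      (List.range m).foldl (fun best (j : Nat) =>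
        let t := PySem.List.pyGetD col (j : Int) (0, 0, 0)
        max best (PySem.List.pyGetD (PySem.List.pyGetD A (i : Int) []) (j : Int) 0 +
          (if i = t.2.1 then t.2.2 else t.1))) best) 0

-- ===== PRECONDITION & SPEC =====
-- Pre_solution is exactly where A returns: with a non-empty first row, A needs at least
-- two rows (max of an empty candidate list raises ValueError) and every row of length
-- at least max(len(A[0]), 2) (shorter rows hit an IndexError on A[k][j] or on the
-- second element of a sorted row); with an empty first row A returns 0 for any shape.
def Pre_solution (A : List (List Int)) : Prop :=
  (A.headD []).length = 0 ∨
    (2 ≤ A.length ∧ ∀ row ∈ A, (A.headD []).length ≤ row.length ∧ 2 ≤ row.length)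
instance (A : List (List Int)) : Decidable (Pre_solution A) := by
  unfold Pre_solution; infer_instance
def pvWitness_solution : List (List Int) := [[1, 2], [3, 4]]
def Spec_solution (A : List (List Int)) (out : Int) : Prop := out = solution_alt A
instance (A : List (List Int)) (out : Int) : Decidable (Spec_solution A out) := by
  unfold Spec_solution; infer_instance

-- ===== CLAIM (what is proved, stated in full; the proofs are below) =====
def Claim_equal_solution : Prop :=
  ∀ (A : List (List Int)), Dom_solution A → Pre_solution A → Spec_solution A (solution A)

-- ===== LEMMAS AND PROOFS =====

-- row k of A, the shared per-row and per-column quantities of both ports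
def pvRow (A : List (List Int)) (k : Nat) : List Int := A.getD k []
def pvTop (row : List Int) : Int × Int :=
  (PySem.List.pyGetD (PySem.List.sorted row (fun x => x) true) 0 0,
   PySem.List.pyGetD (PySem.List.sorted row (fun x => x) true) 1 0)
def pvCnd (A : List (List Int)) (j k : Nat) : Int :=
  if (pvTop (pvRow A k)).1 ≠ PySem.List.pyGetD (pvRow A k) (j : Int) 0
  then (pvTop (pvRow A k)).1 else (pvTop (pvRow A k)).2
def pvCand (A : List (List Int)) (j : Nat) : List Int :=
  (List.range A.length).map (pvCnd A j)
def pvB1 (A : List (List Int)) (j : Nat) : Int :=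
  ((PySem.List.max? (pvCand A j) (fun x => x)).getD 0)
def pvI1 (A : List (List Int)) (j : Nat) : Nat :=
  (PySem.List.index? (pvCand A j) (pvB1 A j)).getD 0
def pvB2 (A : List (List Int)) (j : Nat) : Int :=
  ((PySem.List.max? ((pvCand A j).eraseIdx (pvI1 A j)) (fun x => x)).getD 0)

lemma pvGetD_map_of_lt {α β : Type} (f : α → β) (l : List α) (k : Nat)
    (h : k < l.length) (d : β) (d' : α) : (l.map f).getD k d = f (l.getD k d') := by
  rw [List.getD_eq_getElem _ _ (by simpa using h), List.getD_eq_getElem _ _ h]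
  simp

lemma pvGetD_zero_headD (A : List (List Int)) : A.getD 0 [] = A.headD [] := by
  cases A <;> rfl

-- the skip-one append loop of port A builds the eraseIdx of the full map
lemma pvCandLoopA (n i : Nat) (f : Nat → Int) (h : i < n) :
    (List.range n).foldl (fun acc k => if k = i then acc else acc ++ [f k]) [] =
      ((List.range n).map f).eraseIdx i := by
  induction n with
  | zero => omega
  | succ n ih =>
    rw [List.range_succ, List.foldl_append, List.map_append]
    rcases Nat.lt_or_ge i n with hlt | hge
    · rw [ih hlt]
      rw [List.eraseIdx_append_of_lt_length (by simpa using hlt)]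
      simp [Nat.ne_of_gt hlt]
    · have hin : i = n := by omega
      subst hin
      have hcg : (List.range i).foldl (fun acc k => if k = i then acc else acc ++ [f k]) [] =
          (List.range i).foldl (fun acc k => acc ++ [f k]) [] := by
        apply PySem.List.foldl_congr_mem
        intro acc x hx
        simp at hx
        simp [Nat.ne_of_lt hx]
      rw [hcg, PySem.List.foldl_append_singleton_eq_map]
      simp [List.eraseIdx_eq_take_drop_succ]

lemma pvMem_eraseIdx_of_getElem {α : Type} (l : List α) (i1 i : Nat) (h : i1 < l.length)
    (hne : i1 ≠ i) : l[i1] ∈ l.eraseIdx i := by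
  rw [List.eraseIdx_eq_take_drop_succ]
  rcases Nat.lt_or_ge i1 i with hlt | hge
  · apply List.mem_append_left
    have h' : l[i1] = (l.take i)[i1]'(by simp; omega) := by simp [List.getElem_take]
    rw [h']; exact List.getElem_mem _
  · apply List.mem_append_right
    have h2 : i1 - (i+1) < (l.drop (i+1)).length := by simp; omega
    have h' : l[i1] = (l.drop (i+1))[i1 - (i+1)]'h2 := by
      rw [List.getElem_drop]; congr 1; omega
    rw [h']; exact List.getElem_mem _

-- leave-one-out maximum from the top candidate, its first position and the runner-up
lemma pvLooMax (l : List Int) (h2 : 2 ≤ l.length) (i : Nat) (hi : i < l.length) :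
    (PySem.List.max? (l.eraseIdx i) (fun x => x)).getD 0 =
      (if i = (PySem.List.index? l ((PySem.List.max? l (fun x => x)).getD 0)).getD 0
       then (PySem.List.max? (l.eraseIdx
          ((PySem.List.index? l ((PySem.List.max? l (fun x => x)).getD 0)).getD 0))
          (fun x => x)).getD 0
       else (PySem.List.max? l (fun x => x)).getD 0) := by
  obtain ⟨M, hM⟩ : ∃ M, PySem.List.max? l (fun x => x) = some M := by
    cases hM : PySem.List.max? l (fun x => x) with
    | none => rw [PySem.List.max?_eq_none_iff] at hM; subst hM; simp at h2
    | some M => exact ⟨M, rfl⟩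
  have hMmem : M ∈ l := PySem.List.max?_mem hM
  have hMmax : ∀ y ∈ l, y ≤ M := fun y hy => PySem.List.max?_isMax hM y hy
  obtain ⟨i1, hI⟩ : ∃ i1, PySem.List.index? l M = some i1 := by
    have hs := (PySem.List.index?_isSome_iff l M).mpr hMmem
    cases h : PySem.List.index? l M with
    | none => rw [h] at hs; simp at hs
    | some k => exact ⟨k, rfl⟩
  obtain ⟨hk, hlk, -⟩ := PySem.List.getElem_of_index?_eq_some hI
  rw [hM, Option.getD_some, hI, Option.getD_some]
  by_cases hii : i = i1
  · rw [if_pos hii, hii]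
  · rw [if_neg hii]
    obtain ⟨m', hm'⟩ : ∃ m', PySem.List.max? (l.eraseIdx i) (fun x => x) = some m' := by
      cases h : PySem.List.max? (l.eraseIdx i) (fun x => x) with
      | none =>
        rw [PySem.List.max?_eq_none_iff] at h
        have hl := congrArg List.length h
        rw [List.length_eraseIdx_of_lt hi] at hl
        simp at hl; omega
      | some m' => exact ⟨m', rfl⟩
    have h1 : m' ≤ M := hMmax m' (List.mem_of_mem_eraseIdx (PySem.List.max?_mem hm'))
    have hMin : M ∈ l.eraseIdx i := by
      have hmm := pvMem_eraseIdx_of_getElem l i1 i hk (fun h => hii h.symm)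
      rwa [hlk] at hmm
    have h2' : M ≤ m' := PySem.List.max?_isMax hm' M hMin
    rw [hm', Option.getD_some]
    omega

def pvVal (A : List (List Int)) (i j : Nat) : Int :=
  PySem.List.pyGetD (pvRow A i) (j : Int) 0 +
    (if i = pvI1 A j then pvB2 A j else pvB1 A j)

lemma pvCandA (A : List (List Int)) (i j : Nat) (hi : i < A.length) :
    (List.range A.length).foldl
      (fun acc (k : Nat) =>
        if k = i then acc
        else
          if (PySem.List.pyGetD (List.map (fun x => PySem.List.sorted x (fun x => x) true) A)
                (k : Int) []).getD 0 0 ≠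
              PySem.List.pyGetD (PySem.List.pyGetD A (k : Int) []) (j : Int) 0 then
            acc ++ [(PySem.List.pyGetD (List.map (fun x => PySem.List.sorted x (fun x => x) true) A)
                (k : Int) []).getD 0 0]
          else
            acc ++ [PySem.List.pyGetD
                (PySem.List.pyGetD (List.map (fun x => PySem.List.sorted x (fun x => x) true) A)
                  (k : Int) []) 1 0]) [] = (pvCand A j).eraseIdx i := by
  calc (List.range A.length).foldl _ []
      = (List.range A.length).foldl
          (fun acc (k : Nat) => if k = i then acc else acc ++ [pvCnd A j k]) [] := by
        apply PySem.List.foldl_congr_mem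
        intro acc k hk
        rw [List.mem_range] at hk
        by_cases hki : k = i
        · simp [hki]
        · rw [if_neg hki, if_neg hki]
          have h1 : (List.map (fun x => PySem.List.sorted x (fun x => x) true) A).getD k [] =
              PySem.List.sorted (A.getD k []) (fun x => x) true :=
            pvGetD_map_of_lt _ A k hk [] []
          simp only [PySem.List.pyGetD_natCast, h1, pvCnd, pvTop, pvRow,
            PySem.List.pyGetD_zero]
          split <;> rfl
    _ = ((List.range A.length).map (pvCnd A j)).eraseIdx i := pvCandLoopA A.length i _ hi
    _ = (pvCand A j).eraseIdx i := rfl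

lemma pvSolutionA_eq (A : List (List Int)) (hn : 2 ≤ A.length) :
    solution A =
      (List.range A.length).foldl (fun b i =>
        (List.range (A.headD []).length).foldl (fun b j => max b (pvVal A i j)) b) 0 := by
  unfold solution
  simp only [PySem.List.foldl_append_singleton_eq_map, List.nil_append,
    PySem.List.pyGetD_zero, pvGetD_zero_headD]
  apply PySem.List.foldl_congr_mem
  intro b i hi
  rw [List.mem_range] at hi
  apply PySem.List.foldl_congr_mem
  intro b' j hj
  rw [List.mem_range] at hj
  rw [pvCandA A i j hi]
  rw [pvLooMax (pvCand A j) (by simp [pvCand]; omega) i (by simpa [pvCand] using hi)]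
  simp only [pvVal, pvI1, pvB1, pvB2, pvRow, PySem.List.pyGetD_natCast]

lemma pvSliceErase (l : List Int) (i1 : Nat) :
    PySem.List.slice l none (some (i1 : Int)) ++ PySem.List.slice l (some ((i1 : Int) + 1)) none =
      l.eraseIdx i1 := by
  have hc : ((i1 : Int) + 1) = ((i1 + 1 : Nat) : Int) := by push_cast; ring
  rw [PySem.List.slice_to_natCast, hc, PySem.List.slice_from_natCast,
    List.eraseIdx_eq_take_drop_succ]

lemma pvCandB (A : List (List Int)) (j : Nat) :
    List.map
      (fun k : Nat =>
        if (PySem.List.pyGetD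
              (List.map (fun x => (PySem.List.pyGetD (PySem.List.sorted x (fun x => x) true) 0 0,
                PySem.List.pyGetD (PySem.List.sorted x (fun x => x) true) 1 0)) A)
              (k : Int) (0, 0)).1 ≠
            PySem.List.pyGetD (PySem.List.pyGetD A (k : Int) []) (j : Int) 0
        then (PySem.List.pyGetD
              (List.map (fun x => (PySem.List.pyGetD (PySem.List.sorted x (fun x => x) true) 0 0,
                PySem.List.pyGetD (PySem.List.sorted x (fun x => x) true) 1 0)) A)
              (k : Int) (0, 0)).1
        else (PySem.List.pyGetD
              (List.map (fun x => (PySem.List.pyGetD (PySem.List.sorted x (fun x => x) true) 0 0,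
                PySem.List.pyGetD (PySem.List.sorted x (fun x => x) true) 1 0)) A)
              (k : Int) (0, 0)).2)
      (List.range A.length) = pvCand A j := by
  unfold pvCand
  apply List.map_congr_left
  intro k hk
  rw [List.mem_range] at hk
  have h1 : (List.map (fun x => (PySem.List.pyGetD (PySem.List.sorted x (fun x => x) true) 0 0,
      PySem.List.pyGetD (PySem.List.sorted x (fun x => x) true) 1 0)) A).getD k (0, 0) =
      pvTop (A.getD k []) := pvGetD_map_of_lt _ A k hk (0, 0) []
  simp only [PySem.List.pyGetD_natCast, h1, pvCnd, pvTop, pvRow]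

lemma pvSolutionAlt_eq (A : List (List Int)) (hn : 2 ≤ A.length)
    (hrow : ∀ row ∈ A, (A.headD []).length ≤ row.length ∧ 2 ≤ row.length) :
    solution_alt A =
      (List.range A.length).foldl (fun b i =>
        (List.range (A.headD []).length).foldl (fun b j => max b (pvVal A i j)) b) 0 := by
  have hne : ¬(A = [] ∨ A.headD [] = []) := by
    rintro (h | h)
    · subst h; simp at hn
    · have h0 : A.headD [] ∈ A := by
        cases A with
        | nil => simp at hn
        | cons a t => simp
      have h2 := (hrow _ h0).2
      rw [h] at h2; simp at h2
  unfold solution_alt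
  rw [if_neg hne]
  simp only [PySem.List.foldl_append_singleton_eq_map, List.nil_append]
  simp only [pvCandB, pvSliceErase]
  apply PySem.List.foldl_congr_mem
  intro b i hi
  rw [List.mem_range] at hi
  apply PySem.List.foldl_congr_mem
  intro b' j hj
  rw [List.mem_range] at hj
  simp only [PySem.List.pyGetD_natCast]
  rw [PySem.List.getD_map_range _ _ _ _ hj]
  simp only [pvVal, pvB1, pvI1, pvB2, pvRow, PySem.List.pyGetD_natCast]

-- ===== VERDICT (by name: the statement is the Claim_ definition above) =====
theorem solution_spec : Claim_equal_solution := by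
  intro A _ hpre
  unfold Spec_solution
  rcases hpre with h0 | ⟨hn, hrow⟩
  · have hhead : A.headD [] = [] := List.length_eq_zero_iff.mp h0
    unfold solution solution_alt
    rw [if_pos (Or.inr hhead)]
    rw [PySem.List.pyGetD_zero, pvGetD_zero_headD, hhead]
    simp
  · rw [pvSolutionA_eq A hn, pvSolutionAlt_eq A hn hrow]
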